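-- pv_equiv track=rewrite | github.com/ich-liebe-dich-Elysia/staged-story-diffusion | dus_scheduler.py | dilated_schedule
-- ===== SOURCE A (Python) =====
-- import math
--
-- def dilated_schedule(positions: list[int], base: int = 2) -> list[list[int]]:
--     """
--     对位置列表生成 DUS 稀释调度方案。
--
--     参数：
--         positions : 需要 unmask 的位置索引列表（顺序不限）
--         base      : 稀释基数，默认 2（每步间距翻倍）
--
--     返回：
--         steps : list of list，每个子列表是该步要解码的位置集合。
--                 steps[0] 间距最大（最稀疏），steps[-1] 包含剩余位置。
--
--     示例（8个位置，base=2）：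
--         positions = [2, 3, 4, 5, 6, 7, 8, 9]
--         steps[0] = [2, 6]      stride=4
--         steps[1] = [4, 8]      stride=4（偏移2）
--         steps[2] = [3, 5, 7, 9] stride=2 的剩余
--     """
--     if not positions:
--         return []
--
--     sorted_pos = sorted(positions)
--     n = len(sorted_pos)
--     num_steps = max(1, math.ceil(math.log2(n + 1)))
--
--     assigned = set()
--     steps = []
--
--     stride = 2 ** (num_steps - 1)
--     while stride >= 1:
--         step_positions = []
--         for offset in range(stride):
--             for idx in range(offset, n, stride * 2):
--                 p = sorted_pos[idx]
--                 if p not in assigned: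
--                     step_positions.append(p)
--                     assigned.add(p)
--         if step_positions:
--             steps.append(sorted(step_positions))
--         stride //= 2
--
--     # 兜底：把还未分配的位置放到最后一步
--     remaining = [p for p in sorted_pos if p not in assigned]
--     if remaining:
--         steps.append(remaining)
--
--     return steps
-- ===== SOURCE B (Python) =====
-- import math
--
-- def dilated_schedule(positions: list[int], base: int = 2) -> list[list[int]]:
--     """Direct per-slot level computation: slot i of the sorted list belongs to the
--     step of the highest stride 2**j (j < num_steps) whose sweep covers it, i.e. the
--     largest j with bit j of i equal to 0.  Each distinct position is decoded once,
--     at the earliest step that covers any of its slots (A's assigned-set rule).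
--     (base is unused, exactly as in the original.)"""
--     if not positions:
--         return []
--     sorted_pos = sorted(positions)
--     n = len(sorted_pos)
--     num_steps = max(1, math.ceil(math.log2(n + 1)))
--
--     def level(i: int) -> int:
--         for j in range(num_steps - 1, -1, -1):
--             if not (i >> j) & 1:
--                 return j
--         return 0  # unreachable: i <= n - 1 < 2**num_steps - 1 always has a zero bit
--
--     best = {}  # position -> earliest (= highest-level) step that covers one of its slots
--     for i, p in enumerate(sorted_pos):
--         best[p] = max(best.get(p, -1), level(i))
--
--     out = []
--     for j in range(num_steps - 1, -1, -1):
--         bucket = [p for p in best if best[p] == j]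
--         if bucket:
--             out.append(bucket)
--     return out
-- ===== Notes on version B (the rewrite author's own statement) =====
-- stated objective: alternative
-- what changed: A sweeps strides 2^(num_steps-1)..1 with nested offset loops over a mutable assigned-set plus a fallback 'remaining' pass; B computes each slot's level directly (largest j < num_steps whose bit of the slot index is clear), keeps each distinct position's highest level in one dict pass, and emits the per-level buckets from the highest level down, with no assigned-set sweep and no remaining pass.
import Mathlib
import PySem

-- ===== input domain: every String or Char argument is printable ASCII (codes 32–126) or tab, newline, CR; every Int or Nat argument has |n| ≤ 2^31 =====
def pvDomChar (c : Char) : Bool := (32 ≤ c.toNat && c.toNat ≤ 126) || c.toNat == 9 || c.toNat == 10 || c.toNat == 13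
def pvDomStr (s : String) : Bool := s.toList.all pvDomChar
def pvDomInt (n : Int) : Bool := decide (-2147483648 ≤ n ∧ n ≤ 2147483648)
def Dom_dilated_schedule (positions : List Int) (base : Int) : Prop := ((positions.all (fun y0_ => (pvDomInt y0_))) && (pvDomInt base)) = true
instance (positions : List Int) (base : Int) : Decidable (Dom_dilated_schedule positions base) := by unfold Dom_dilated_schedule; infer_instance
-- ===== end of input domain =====

-- B replaces A's stride sweep over a mutable assigned-set by a direct per-slot level
-- computation (largest j < num_steps with bit j of the slot index clear), a dict
-- keeping each distinct position's highest level, and per-level buckets emitted from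
-- the highest level down; same result by a different route, similar cost.

-- ===== PORT A =====
-- body of the innermost 'for idx in range(offset, n, stride*2)' loop of A
def dsStep (l : List Int) (acc : List Int × PySem.Set Int) (idx : Int) : List Int × PySem.Set Int :=
  let p := PySem.List.pyGetD l idx 0
  if acc.2.contains p then acc else (acc.1 ++ [p], acc.2.add p)

-- one iteration of A's 'while stride >= 1' body: the two nested for-loops
def dsPhase (l : List Int) (n stride : Int) (assigned : PySem.Set Int) : List Int × PySem.Set Int :=
  (PySem.List.pyRange 0 stride 1).foldl
    (fun acc offset => (PySem.List.pyRange offset n (stride * 2)).foldl (dsStep l) acc)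
    ([], assigned)

-- A's 'while stride >= 1' loop (stride is a nonnegative int; 'stride //= 2' is Nat division)
def dsLoop (l : List Int) (n : Int) (stride : Nat) (assigned : PySem.Set Int)
    (steps : List (List Int)) : List (List Int) × PySem.Set Int :=
  if h : 1 ≤ stride then
    let r := dsPhase l n (stride : Int) assigned
    dsLoop l n (stride / 2) r.2
      (if r.1 = [] then steps else steps ++ [PySem.List.sorted r.1 (fun p => p)])
  else (steps, assigned)
termination_by stride
decreasing_by exact Nat.div_lt_self h one_lt_two

def dilated_schedule (positions : List Int) (base : Int) : List (List Int) :=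
  if positions = [] then []
  else
    let sorted_pos := PySem.List.sorted positions (fun p => p)
    let n := sorted_pos.length
    -- math.ceil(math.log2 (n + 1)) is exactly Nat.clog 2 (n + 1) here (n ≥ 1)
    let num_steps := max 1 (Nat.clog 2 (n + 1))
    let r := dsLoop sorted_pos (n : Int) (2 ^ (num_steps - 1)) PySem.Set.empty []
    let remaining := sorted_pos.filter (fun p => !(r.2.contains p))
    if remaining = [] then r.1 else r.1 ++ [remaining]

-- ===== PORT B =====
-- Source B's level(i): first j in num_steps-1, …, 0 with bit j of i clear, else 0
def dsLevel : Nat → Nat → Nat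
  | 0, _ => 0
  | j + 1, i => if ((i >>> j) &&& 1) == 0 then j else dsLevel j i

-- Source B's "for i, p in enumerate(sorted_pos): best[p] = max(best.get(p, -1), level(i))"
def dsBest (l : List Int) (K : Nat) : PySem.Dict Int Int :=
  (PySem.List.enumerate l).foldl
    (fun d ip =>
      d.insert ip.2 (max (PySem.Dict.getD d ip.2 (-1)) ((dsLevel K ip.1.toNat : Nat) : Int)))
    PySem.Dict.empty

def dilated_schedule_alt (positions : List Int) (base : Int) : List (List Int) :=
  if positions = [] then []
  else
    let sorted_pos := PySem.List.sorted positions (fun p => p)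
    let n := sorted_pos.length
    let num_steps := max 1 (Nat.clog 2 (n + 1))
    let best := dsBest sorted_pos num_steps
    -- "[p for p in best if best[p] == j]": best[p] always hits, ported as getD with default 0
    ((List.range num_steps).reverse).foldl
      (fun out (j : Nat) =>
        let bucket := best.keys.filter (fun p => PySem.Dict.getD best p 0 == (j : Int))
        if bucket = [] then out else out ++ [bucket])
      []

-- ===== PRECONDITION & SPEC =====
def Spec_dilated_schedule (positions : List Int) (base : Int) (out : List (List Int)) : Prop :=
  out = dilated_schedule_alt positions base
instance (positions : List Int) (base : Int) (out : List (List Int)) : Decidable (Spec_dilated_schedule positions base out) := by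
  unfold Spec_dilated_schedule; infer_instance

-- ===== CLAIM (what is proved, stated in full; the proofs are below) =====
def Claim_equal_dilated_schedule : Prop := ∀ (positions : List Int) (base : Int),
  Dom_dilated_schedule positions base →
  Spec_dilated_schedule positions base (dilated_schedule positions base)

-- ===== LEMMAS AND PROOFS =====

-- value of the sorted list at an Int index
def dsVal (l : List Int) (idx : Int) : Int := PySem.List.pyGetD l idx 0

-- the values a run of dsStep appends: first occurrences not already in S, in order
def newOnes (S : PySem.Set Int) : List Int → List Int
  | [] => []
  | p :: ps => if S.contains p then newOnes S ps else p :: newOnes (S.add p) ps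

-- all indices visited by one phase (stride s), in visit order
def phaseIdx (n s : Int) : List Int :=
  (PySem.List.pyRange 0 s 1).flatMap (fun off => PySem.List.pyRange off n (s * 2))

-- "position p's highest slot level is j": attained at some slot, and no slot exceeds it
def dsCondB (l : List Int) (K j : Nat) (p : Int) : Bool :=
  ((List.range l.length).any (fun i => dsVal l (i : Int) == p && dsLevel K i == j)) &&
  ((List.range l.length).all (fun i => !(dsVal l (i : Int) == p) || decide (dsLevel K i ≤ j)))

-- the positions decoded at level j, in increasing order (both programs produce this)
def bucketD (l : List Int) (K j : Nat) : List Int :=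
  (PySem.List.dedup l).filter (dsCondB l K j)

-- invariant on A's assigned set: exactly the values one of whose slots has level ≥ j
def InvS (l : List Int) (K : Nat) (S : PySem.Set Int) (j : Nat) : Prop :=
  ∀ q, q ∈ S ↔ ∃ i : Nat, i < l.length ∧ j ≤ dsLevel K i ∧ q = dsVal l (i : Int)

theorem dsCondB_iff (l : List Int) (K j : Nat) (p : Int) : dsCondB l K j p = true ↔
    ((∃ i : Nat, i < l.length ∧ dsVal l (i : Int) = p ∧ dsLevel K i = j) ∧
     (∀ i : Nat, i < l.length → dsVal l (i : Int) = p → dsLevel K i ≤ j)) := by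
  simp only [dsCondB, Bool.and_eq_true, List.any_eq_true, List.all_eq_true, List.mem_range,
    Bool.or_eq_true, Bool.not_eq_true', beq_eq_false_iff_ne, beq_iff_eq, decide_eq_true_eq,
    ne_eq]
  constructor
  · rintro ⟨⟨i, hi, hv, hl⟩, hb⟩
    exact ⟨⟨i, hi, hv, hl⟩, fun i hi hv => (hb i hi).elim (fun h => absurd hv h) id⟩
  · rintro ⟨⟨i, hi, hv, hl⟩, hb⟩
    refine ⟨⟨i, hi, hv, hl⟩, fun i hi => ?_⟩
    by_cases hv : dsVal l (i : Int) = p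
    · exact Or.inr (hb i hi hv)
    · exact Or.inl hv

theorem dsVal_eq_getElem (l : List Int) (i : Nat) (hi : i < l.length) : dsVal l (i : Int) = l[i] := by
  rw [dsVal, PySem.List.pyGetD_natCast, List.getD_eq_getElem _ _ hi]

theorem dsLevel_lt (K i : Nat) (hK : 1 ≤ K) : dsLevel K i < K := by
  induction K with
  | zero => omega
  | succ K ih =>
    simp only [dsLevel]
    split
    · omega
    · rcases Nat.eq_zero_or_pos K with h | h
      · subst h; simp [dsLevel]
      · exact Nat.lt_succ_of_lt (ih h)

theorem testBit_false_iff_mod (i j : Nat) : i.testBit j = false ↔ i % 2 ^ (j + 1) < 2 ^ j := by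
  have h1 : i % (2 ^ j * 2) = i % 2 ^ j + 2 ^ j * (i / 2 ^ j % 2) := Nat.mod_mul
  have h2 : i % 2 ^ j < 2 ^ j := Nat.mod_lt _ (Nat.pow_pos (by norm_num))
  have h3 : i.testBit j = ((i / 2 ^ j) % 2 == 1) := by
    simp [Nat.testBit, Nat.shiftRight_eq_div_pow]
  rw [pow_succ]
  rcases Nat.mod_two_eq_zero_or_one (i / 2 ^ j) with h | h <;>
    simp [h3, h, h1] <;> omega

theorem exists_zero_bit (K i : Nat) (h : i < 2 ^ K - 1) : ∃ j, j < K ∧ i.testBit j = false := by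
  induction K generalizing i with
  | zero => simp at h
  | succ K ih =>
    have hp : 2 ^ (K + 1) = 2 * 2 ^ K := by rw [pow_succ]; ring
    rcases Nat.mod_two_eq_zero_or_one i with h0 | h0
    · refine ⟨0, Nat.succ_pos K, ?_⟩
      simp [Nat.testBit_zero, h0]
    · have h1 : 1 ≤ 2 ^ K := Nat.one_le_two_pow
      have hi : i / 2 < 2 ^ K - 1 := by omega
      obtain ⟨j, hj, hb⟩ := ih _ hi
      exact ⟨j + 1, by omega, by rw [Nat.testBit_add_one]; exact hb⟩

theorem dsLevel_spec (K i j : Nat) (hz : ∃ j', j' < K ∧ i.testBit j' = false) :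
    dsLevel K i = j ↔ j < K ∧ i.testBit j = false ∧ ∀ j', j < j' → j' < K → i.testBit j' = true := by
  induction K with
  | zero => obtain ⟨j', hj', _⟩ := hz; omega
  | succ K ih =>
    have hbit : (((i >>> K) &&& 1) == 0) = !(i.testBit K) := by
      simp only [Nat.testBit, Nat.one_and_eq_mod_two, Nat.and_one_is_mod]
      rcases Nat.mod_two_eq_zero_or_one (i >>> K) with h | h <;> simp [h]
    simp only [dsLevel, hbit]
    by_cases hK : i.testBit K = true
    · have hz' : ∃ j', j' < K ∧ i.testBit j' = false := by
        obtain ⟨j', hj', hb⟩ := hz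
        refine ⟨j', ?_, hb⟩
        rcases Nat.lt_succ_iff_lt_or_eq.mp hj' with h | h
        · exact h
        · subst h; rw [hK] at hb; cases hb
      rw [if_neg (by simp [hK]), ih hz']
      constructor
      · rintro ⟨h1, h2, h3⟩
        refine ⟨by omega, h2, fun j' hj1 hj2 => ?_⟩
        rcases Nat.lt_succ_iff_lt_or_eq.mp hj2 with h | h
        · exact h3 j' hj1 h
        · subst h; exact hK
      · rintro ⟨h1, h2, h3⟩
        refine ⟨?_, h2, fun j' hj1 hj2 => h3 j' hj1 (by omega)⟩
        rcases Nat.lt_succ_iff_lt_or_eq.mp h1 with h | h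
        · exact h
        · subst h; rw [hK] at h2; cases h2
    · have hKf : i.testBit K = false := Bool.eq_false_iff.mpr hK
      rw [if_pos (by simp [hKf])]
      constructor
      · rintro rfl
        exact ⟨Nat.lt_succ_self K, hKf, fun j' h1 h2 => by omega⟩
      · rintro ⟨h1, h2, h3⟩
        by_contra hne
        have hjK : j < K := by
          rcases Nat.lt_succ_iff_lt_or_eq.mp h1 with h | h
          · exact h
          · exact (hne h.symm).elim
        have := h3 K hjK (Nat.lt_succ_self K)
        rw [this] at hKf; cases hKf

theorem dsLevel_self_spec (K i : Nat) (hz : ∃ j', j' < K ∧ i.testBit j' = false) :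
    dsLevel K i < K ∧ i.testBit (dsLevel K i) = false ∧
      ∀ j', dsLevel K i < j' → j' < K → i.testBit j' = true :=
  (dsLevel_spec K i (dsLevel K i) hz).mp rfl

theorem dsLevel_ge_of_bit (K j m : Nat) (hj : j < K)
    (hz : ∃ j', j' < K ∧ m.testBit j' = false) (hb : m.testBit j = false) :
    j ≤ dsLevel K m := by
  obtain ⟨_, _, habove⟩ := dsLevel_self_spec K m hz
  by_contra hlt
  have := habove j (by omega) hj
  rw [this] at hb; cases hb

theorem foldl_dsStep (l : List Int) (L : List Int) (acc : List Int × PySem.Set Int) :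
    L.foldl (dsStep l) acc =
      (acc.1 ++ newOnes acc.2 (L.map (dsVal l)), PySem.Set.update acc.2 (L.map (dsVal l))) := by
  induction L generalizing acc with
  | nil => simp [newOnes, PySem.Set.update]
  | cons a t ih =>
    have hupd : ∀ (s : PySem.Set Int) (v : Int) (vs : List Int),
        PySem.Set.update s (v :: vs) = PySem.Set.update (s.add v) vs := by
      intro s v vs; simp [PySem.Set.update]
    simp only [List.foldl_cons, List.map_cons, newOnes, hupd]
    by_cases h : acc.2.contains (dsVal l a) = true
    · have ha : PySem.Set.add acc.2 (dsVal l a) = acc.2 := by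
        simp only [PySem.Set.add]
        rw [if_pos h]
      have hstep : dsStep l acc a = acc := by
        simp only [dsStep, dsVal] at h ⊢
        rw [if_pos h]
      rw [hstep, ih, h, ha]
      simp
    · have hstep : dsStep l acc a = (acc.1 ++ [dsVal l a], acc.2.add (dsVal l a)) := by
        simp only [dsStep, dsVal] at h ⊢
        rw [if_neg h]
      rw [hstep, ih]
      rw [if_neg h]
      simp

theorem mem_newOnes (S : PySem.Set Int) (ps : List Int) (q : Int) :
    q ∈ newOnes S ps ↔ q ∈ ps ∧ q ∉ S := by
  induction ps generalizing S with
  | nil => simp [newOnes]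
  | cons p t ih =>
    by_cases hc : S.contains p = true
    · have hpS : p ∈ S := (PySem.Set.contains_iff S p).mp hc
      rw [newOnes, if_pos hc, ih]
      constructor
      · rintro ⟨ht, hn⟩
        exact ⟨List.mem_cons_of_mem _ ht, hn⟩
      · rintro ⟨hmem, hn⟩
        rcases List.mem_cons.mp hmem with rfl | ht
        · exact absurd hpS hn
        · exact ⟨ht, hn⟩
    · have hpS : p ∉ S := fun hm => hc ((PySem.Set.contains_iff S p).mpr hm)
      rw [newOnes, if_neg hc]
      rw [List.mem_cons, ih (S.add p)]
      constructor
      · rintro (rfl | ⟨ht, hn⟩)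
        · exact ⟨List.mem_cons_self .., hpS⟩
        · rw [PySem.Set.mem_add] at hn
          exact ⟨List.mem_cons_of_mem _ ht, fun hq => hn (Or.inl hq)⟩
      · rintro ⟨hmem, hn⟩
        rcases List.mem_cons.mp hmem with rfl | ht
        · exact Or.inl rfl
        · by_cases hqp : q = p
          · exact Or.inl hqp
          · refine Or.inr ⟨ht, ?_⟩
            rw [PySem.Set.mem_add]
            rintro (h | h)
            · exact hn h
            · exact hqp h

theorem nodup_newOnes (S : PySem.Set Int) (ps : List Int) : (newOnes S ps).Nodup := by
  induction ps generalizing S with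
  | nil => simp [newOnes]
  | cons p t ih =>
    by_cases hc : S.contains p = true
    · rw [newOnes, if_pos hc]; exact ih S
    · rw [newOnes, if_neg hc]
      refine List.nodup_cons.mpr ⟨?_, ih (S.add p)⟩
      intro hmem
      have := ((mem_newOnes (S.add p) t p).mp hmem).2
      exact this ((PySem.Set.mem_add S p p).mpr (Or.inr rfl))

theorem residue_of_mem_pyRange (off n s2 x : Int) (hs2 : 0 < s2) (h0 : 0 ≤ off) (hlt : off < s2)
    (hx : x ∈ PySem.List.pyRange off n s2) : x % s2 = off := by
  rw [PySem.List.mem_pyRange_iff_of_pos hs2] at hx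
  obtain ⟨h1, _, h3⟩ := hx
  have hz : (x - off) % s2 = 0 := Int.emod_eq_zero_of_dvd h3
  have h4 : x % s2 = off % s2 := Int.emod_eq_emod_iff_emod_sub_eq_zero.mpr hz
  rw [h4, Int.emod_eq_of_lt h0 hlt]

theorem mem_phaseIdx (n : Int) (j : Nat) (idx : Int) :
    idx ∈ phaseIdx n ((2 ^ j : Nat) : Int) ↔
      ∃ m : Nat, idx = (m : Int) ∧ (m : Int) < n ∧ m.testBit j = false := by
  have hs : (0 : Int) < ((2 ^ j : Nat) : Int) := by exact_mod_cast Nat.pow_pos (by norm_num)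
  have hs2 : (0 : Int) < ((2 ^ j : Nat) : Int) * 2 := by positivity
  have hcast : ((2 ^ j : Nat) : Int) * 2 = ((2 ^ (j + 1) : Nat) : Int) := by push_cast; ring
  simp only [phaseIdx, List.mem_flatMap, PySem.List.mem_pyRange_one]
  constructor
  · rintro ⟨off, ⟨hoff0, hoffs⟩, hmem⟩
    have hres : idx % (((2 ^ j : Nat) : Int) * 2) = off :=
      residue_of_mem_pyRange off n _ idx hs2 hoff0 (by nlinarith) hmem
    rw [PySem.List.mem_pyRange_iff_of_pos hs2] at hmem
    obtain ⟨h1, h2, _⟩ := hmem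
    have hidx0 : 0 ≤ idx := le_trans hoff0 h1
    refine ⟨idx.toNat, (Int.toNat_of_nonneg hidx0).symm, by rw [Int.toNat_of_nonneg hidx0]; exact h2, ?_⟩
    rw [testBit_false_iff_mod]
    have : ((idx.toNat % 2 ^ (j + 1) : Nat) : Int) < ((2 ^ j : Nat) : Int) := by
      rw [Int.natCast_mod, Int.toNat_of_nonneg hidx0]
      rw [show ((2 ^ (j + 1) : Nat) : Int) = ((2 ^ j : Nat) : Int) * 2 from hcast.symm, hres]
      exact hoffs
    exact_mod_cast this
  · rintro ⟨m, rfl, hmn, hbit⟩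
    rw [testBit_false_iff_mod] at hbit
    refine ⟨((m % 2 ^ (j + 1) : Nat) : Int), ⟨by positivity, by exact_mod_cast hbit⟩, ?_⟩
    rw [PySem.List.mem_pyRange_iff_of_pos hs2]
    refine ⟨by exact_mod_cast Nat.mod_le m _, hmn, ?_⟩
    rw [hcast]
    have hdvd : (2 ^ (j + 1) : Nat) ∣ m - m % 2 ^ (j + 1) := by
      refine ⟨m / 2 ^ (j + 1), ?_⟩
      have := Nat.div_add_mod m (2 ^ (j + 1))
      omega
    have : ((2 ^ (j + 1) : Nat) : Int) ∣ ((m - m % 2 ^ (j + 1) : Nat) : Int) :=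
      Int.natCast_dvd_natCast.mpr hdvd
    have heq : ((m - m % 2 ^ (j + 1) : Nat) : Int) = (m : Int) - ((m % 2 ^ (j + 1) : Nat) : Int) := by
      have := Nat.mod_le m (2 ^ (j + 1))
      omega
    rwa [heq] at this

-- PySem.Set.ofList keeps a sublist of its input (first occurrences, in order)
theorem foldl_add_sublist (xs : List Int) : ∀ (s : List Int),
    ∃ t, List.foldl PySem.Set.add s xs = s ++ t ∧ t.Sublist xs := by
  induction xs with
  | nil => intro s; exact ⟨[], by simp⟩
  | cons x rest ih =>
    intro s
    simp only [List.foldl_cons]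
    by_cases hc : PySem.Set.contains s x = true
    · have hadd : PySem.Set.add s x = s := by
        simp only [PySem.Set.add]; rw [if_pos hc]
      obtain ⟨t, ht, hsub⟩ := ih s
      exact ⟨t, by rw [hadd]; exact ht, hsub.cons x⟩
    · have hadd : PySem.Set.add s x = s ++ [x] := by
        simp only [PySem.Set.add]; rw [if_neg hc]
      obtain ⟨t, ht, hsub⟩ := ih (s ++ [x])
      refine ⟨x :: t, ?_, hsub.cons₂ x⟩
      rw [hadd, ht, List.append_assoc]
      rfl

theorem dedup_pairwise_lt (l : List Int) (hle : l.Pairwise (fun a b => a ≤ b)) :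
    (PySem.List.dedup l).Pairwise (· < ·) := by
  obtain ⟨t, ht, hsub⟩ := foldl_add_sublist l []
  have hd : PySem.List.dedup l = t := by
    rw [PySem.List.dedup_eq_ofList, PySem.Set.ofList_eq_foldl, ht]
    simp
  have hnd : (PySem.List.dedup l).Nodup := PySem.List.nodup_dedup l
  have hple : (PySem.List.dedup l).Pairwise (fun a b => a ≤ b) := by
    rw [hd]; exact hle.sublist hsub
  exact (hple.and hnd).imp (fun h => lt_of_le_of_ne h.1 h.2)

theorem bucketD_pairwise (l : List Int) (hle : l.Pairwise (fun a b => a ≤ b)) (K j : Nat) :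
    (bucketD l K j).Pairwise (· < ·) :=
  (dedup_pairwise_lt l hle).filter _

theorem phase_main (l : List Int) (hle : l.Pairwise (fun a b => a ≤ b)) (K j : Nat) (hj : j < K)
    (hn : l.length < 2 ^ K) (S : PySem.Set Int) (hS : InvS l K S (j + 1)) :
    PySem.List.sorted (dsPhase l (l.length : Int) ((2 ^ j : Nat) : Int) S).1 (fun p => p) =
        bucketD l K j ∧
      ((dsPhase l (l.length : Int) ((2 ^ j : Nat) : Int) S).1 = [] ↔ bucketD l K j = []) ∧
      InvS l K (dsPhase l (l.length : Int) ((2 ^ j : Nat) : Int) S).2 j := by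
  have hz : ∀ m : Nat, m < l.length → ∃ j', j' < K ∧ m.testBit j' = false := by
    intro m hm
    exact exists_zero_bit K m (by omega)
  have hphase : dsPhase l (l.length : Int) ((2 ^ j : Nat) : Int) S =
      (phaseIdx (l.length : Int) ((2 ^ j : Nat) : Int)).foldl (dsStep l) ([], S) := by
    rw [phaseIdx, List.foldl_flatMap]
    rfl
  set P := phaseIdx (l.length : Int) ((2 ^ j : Nat) : Int) with hP
  rw [hphase, foldl_dsStep]
  simp only [List.nil_append]
  -- membership in the appended values ↔ membership in bucketD
  have hvals : ∀ q, q ∈ P.map (dsVal l) ↔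
      ∃ m : Nat, m < l.length ∧ m.testBit j = false ∧ q = dsVal l (m : Int) := by
    intro q
    rw [List.mem_map]
    constructor
    · rintro ⟨x, hx, rfl⟩
      obtain ⟨m, rfl, hmn, hbit⟩ := (mem_phaseIdx _ j x).mp hx
      exact ⟨m, by exact_mod_cast hmn, hbit, rfl⟩
    · rintro ⟨m, hm, hbit, rfl⟩
      exact ⟨(m : Int), (mem_phaseIdx _ j _).mpr ⟨m, rfl, by exact_mod_cast hm, hbit⟩, rfl⟩
  have hmemsp : ∀ q, q ∈ newOnes S (P.map (dsVal l)) ↔ q ∈ l ∧ dsCondB l K j q = true := by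
    intro q
    rw [mem_newOnes, hvals, dsCondB_iff]
    constructor
    · rintro ⟨⟨m, hm, hbit, rfl⟩, hns⟩
      have hbound : ∀ i : Nat, i < l.length → dsVal l (i : Int) = dsVal l (m : Int) →
          dsLevel K i ≤ j := by
        intro i hi hv
        by_contra hgt
        exact hns ((hS _).mpr ⟨i, hi, by omega, hv.symm⟩)
      have hgej : j ≤ dsLevel K m := dsLevel_ge_of_bit K j m hj (hz m hm) hbit
      have hlev : dsLevel K m = j := le_antisymm (hbound m hm rfl) hgej
      refine ⟨?_, ⟨m, hm, rfl, hlev⟩, hbound⟩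
      rw [dsVal_eq_getElem l m hm]
      exact List.getElem_mem hm
    · rintro ⟨hql, ⟨i0, hi0, hv0, hl0⟩, hbound⟩
      constructor
      · refine ⟨i0, hi0, ?_, hv0.symm⟩
        obtain ⟨_, hbit, _⟩ := dsLevel_self_spec K i0 (hz i0 hi0)
        rwa [hl0] at hbit
      · intro hqS
        obtain ⟨i, hi, hgt, hv⟩ := (hS q).mp hqS
        have := hbound i hi hv.symm
        omega
  have hmemb : ∀ q, q ∈ bucketD l K j ↔ q ∈ l ∧ dsCondB l K j q = true := by
    intro q
    rw [bucketD, List.mem_filter, PySem.List.mem_dedup]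
  have hperm : (newOnes S (P.map (dsVal l))).Perm (bucketD l K j) := by
    refine (List.perm_ext_iff_of_nodup (nodup_newOnes _ _) ?_).mpr ?_
    · rw [bucketD]
      exact (PySem.List.nodup_dedup l).filter _
    · intro q
      rw [hmemsp q, hmemb q]
  refine ⟨?_, ?_, ?_⟩
  · exact PySem.List.sorted_eq_of_perm_of_pairwise_lt _ _ _ hperm.symm (bucketD_pairwise l hle K j)
  · constructor
    · intro h; rw [h] at hperm; exact hperm.symm.eq_nil
    · intro h; rw [h] at hperm; exact hperm.eq_nil
  · intro q
    rw [PySem.Set.mem_update, hS]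
    constructor
    · rintro (⟨i, hi, hge, hq⟩ | hq)
      · exact ⟨i, hi, by omega, hq⟩
      · obtain ⟨m, hm, hbit, rfl⟩ := (hvals q).mp hq
        exact ⟨m, hm, dsLevel_ge_of_bit K j m hj (hz m hm) hbit, rfl⟩
    · rintro ⟨i, hi, hge, hq⟩
      rcases Nat.lt_or_ge j (dsLevel K i) with hlt | hge'
      · exact Or.inl ⟨i, hi, by omega, hq⟩
      · have hlev : dsLevel K i = j := by omega
        refine Or.inr ((hvals q).mpr ⟨i, hi, ?_, hq⟩)
        obtain ⟨_, hbit, _⟩ := dsLevel_self_spec K i (hz i hi)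
        rwa [hlev] at hbit

theorem loop_main (l : List Int) (hle : l.Pairwise (fun a b => a ≤ b)) (K : Nat)
    (hn : l.length < 2 ^ K) :
    ∀ (j : Nat), j < K → ∀ (S : PySem.Set Int) (steps : List (List Int)), InvS l K S (j + 1) →
      (dsLoop l (l.length : Int) (2 ^ j) S steps).1 =
          steps ++ (((List.range (j + 1)).reverse.filter
            (fun j' => !decide (bucketD l K j' = []))).map (bucketD l K)) ∧
        InvS l K (dsLoop l (l.length : Int) (2 ^ j) S steps).2 0 := by
  intro j
  induction j with
  | zero =>
    intro hj S steps hS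
    obtain ⟨hsort, hemp, hinv⟩ := phase_main l hle K 0 hj hn S hS
    rw [dsLoop]
    simp only [dif_pos (by norm_num : 1 ≤ 2 ^ 0)]
    rw [(by norm_num : (2 : Nat) ^ 0 / 2 = 0), dsLoop]
    simp only [dif_neg (by norm_num : ¬ (1 ≤ (0 : Nat)))]
    refine ⟨?_, hinv⟩
    rw [hsort]
    by_cases hb : bucketD l K 0 = []
    · rw [if_pos (hemp.mpr hb)]
      simp [hb]
    · rw [if_neg (fun hsp => hb (hemp.mp hsp))]
      simp [hb]
  | succ j ih =>
    intro hj S steps hS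
    obtain ⟨hsort, hemp, hinv⟩ := phase_main l hle K (j + 1) hj hn S hS
    have hdiv : 2 ^ (j + 1) / 2 = 2 ^ j := by
      rw [pow_succ]; omega
    rw [dsLoop]
    simp only [dif_pos (Nat.one_le_two_pow : 1 ≤ 2 ^ (j + 1))]
    rw [hdiv]
    obtain ⟨ih1, ih2⟩ := ih (by omega)
      (dsPhase l (l.length : Int) ((2 ^ (j + 1) : Nat) : Int) S).2
      (if (dsPhase l (l.length : Int) ((2 ^ (j + 1) : Nat) : Int) S).1 = [] then steps
       else steps ++ [PySem.List.sorted
         (dsPhase l (l.length : Int) ((2 ^ (j + 1) : Nat) : Int) S).1 (fun p => p)]) hinv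
    refine ⟨?_, ih2⟩
    rw [ih1, hsort]
    rw [List.range_succ (n := j + 1), List.reverse_append]
    by_cases hb : bucketD l K (j + 1) = []
    · rw [if_pos (hemp.mpr hb)]
      simp [hb]
    · rw [if_neg (fun hsp => hb (hemp.mp hsp))]
      simp [hb]

-- ===== B-side: the dict of highest levels =====

theorem dsBest_keys (l : List Int) (K : Nat) : (dsBest l K).keys = PySem.List.dedup l := by
  rw [dsBest, PySem.Dict.keys_foldl_insert_key (PySem.List.enumerate l) Prod.snd
    (fun d ip => max (PySem.Dict.getD d ip.2 (-1)) ((dsLevel K ip.1.toNat : Nat) : Int))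
    PySem.Dict.empty]
  rw [PySem.Dict.keys_empty]
  have hm : List.map Prod.snd (PySem.List.enumerate l) = l := PySem.List.map_snd_enumerate l 0
  rw [hm, PySem.List.dedup_eq_ofList, PySem.Set.ofList_eq_foldl]
  simp [PySem.Set.update]

theorem getD_fold_insert_max (g : Int × Int → Int) (L : List (Int × Int)) :
    ∀ (d : PySem.Dict Int Int) (q : Int),
    PySem.Dict.getD
        (L.foldl (fun d ip => d.insert ip.2 (max (PySem.Dict.getD d ip.2 (-1)) (g ip))) d) q (-1)
      = ((L.filter (fun ip => ip.2 == q)).map g).foldl max (PySem.Dict.getD d q (-1)) := by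
  induction L with
  | nil => intro d q; rfl
  | cons ip t ih =>
    intro d q
    simp only [List.foldl_cons, List.filter_cons]
    by_cases hq : ip.2 = q
    · rw [if_pos (by simp [hq])]
      simp only [List.map_cons, List.foldl_cons]
      rw [ih]
      congr 1
      rw [PySem.Dict.getD_insert, if_pos hq.symm, hq]
    · rw [if_neg (by simp [hq])]
      rw [ih]
      congr 1
      rw [PySem.Dict.getD_insert, if_neg (fun h => hq h.symm)]

theorem foldl_max_mem (xs : List Int) : ∀ (a : Int), xs.foldl max a ≠ a → xs.foldl max a ∈ xs := by
  induction xs with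
  | nil => intro a h; exact absurd rfl h
  | cons x t ih =>
    intro a h
    simp only [List.foldl_cons] at h ⊢
    by_cases he : t.foldl max (max a x) = max a x
    · rw [he] at h ⊢
      rcases max_choice a x with hm | hm
      · exact absurd hm h
      · rw [hm]; exact List.mem_cons_self ..
    · exact List.mem_cons_of_mem _ (ih (max a x) he)

theorem getD_dsBest (l : List Int) (K : Nat) (q : Int) (hq : q ∈ l) (j : Nat) :
    (PySem.Dict.getD (dsBest l K) q (-1) = (j : Int)) ↔ (dsCondB l K j q = true) := by
  rw [dsBest, getD_fold_insert_max (fun ip => ((dsLevel K ip.1.toNat : Nat) : Int))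
    (PySem.List.enumerate l) PySem.Dict.empty q]
  rw [PySem.Dict.getD_empty]
  set xs := ((PySem.List.enumerate l).filter (fun ip => ip.2 == q)).map
    (fun ip => ((dsLevel K ip.1.toNat : Nat) : Int)) with hxs
  have hmemxs : ∀ x, x ∈ xs ↔
      ∃ (i : Nat) (_ : i < l.length), l[i] = q ∧ x = ((dsLevel K i : Nat) : Int) := by
    intro x
    rw [hxs]
    simp only [List.mem_map, List.mem_filter, PySem.List.mem_enumerate_iff, beq_iff_eq]
    constructor
    · rintro ⟨ip, ⟨⟨k, hk, rfl⟩, hq2⟩, rfl⟩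
      exact ⟨k, hk, hq2, by simp⟩
    · rintro ⟨i, hi, hv, rfl⟩
      exact ⟨((i : Int), l[i]), ⟨⟨i, hi, by simp⟩, hv⟩, by simp⟩
  have hbound := PySem.List.le_foldl_max xs (-1 : Int)
  obtain ⟨i1, hi1, hv1⟩ := List.mem_iff_getElem.mp hq
  have hx1 : ((dsLevel K i1 : Nat) : Int) ∈ xs :=
    (hmemxs _).mpr ⟨i1, hi1, hv1, rfl⟩
  have hrmem : xs.foldl max (-1) ∈ xs := by
    refine foldl_max_mem xs (-1) ?_
    intro he
    have := hbound.2 _ hx1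
    rw [he] at this
    omega
  rw [dsCondB_iff]
  constructor
  · intro h
    obtain ⟨i, hi, hv, hx⟩ := (hmemxs _).mp hrmem
    constructor
    · refine ⟨i, hi, ?_, ?_⟩
      · rw [dsVal_eq_getElem l i hi]
        exact hv
      · rw [h] at hx
        exact_mod_cast hx.symm
    · intro i' hi' hv'
      have hmem' : ((dsLevel K i' : Nat) : Int) ∈ xs := by
        refine (hmemxs _).mpr ⟨i', hi', ?_, rfl⟩
        rw [← dsVal_eq_getElem l i' hi']
        exact hv'
      have := hbound.2 _ hmem'
      rw [h] at this
      exact_mod_cast this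
  · rintro ⟨⟨i0, hi0, hv0, hl0⟩, hb⟩
    have hx0 : ((j : Nat) : Int) ∈ xs := by
      refine (hmemxs _).mpr ⟨i0, hi0, ?_, by rw [hl0]⟩
      rw [← dsVal_eq_getElem l i0 hi0]
      exact hv0
    refine le_antisymm ?_ (hbound.2 _ hx0)
    obtain ⟨i, hi, hv, hx⟩ := (hmemxs _).mp hrmem
    rw [hx]
    have hle' : dsLevel K i ≤ j := by
      refine hb i hi ?_
      rw [dsVal_eq_getElem l i hi]
      exact hv
    exact_mod_cast hle'

theorem bucketPort_eq (l : List Int) (K j : Nat) :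
    (dsBest l K).keys.filter (fun p => PySem.Dict.getD (dsBest l K) p 0 == (j : Int)) =
      bucketD l K j := by
  rw [bucketD, dsBest_keys]
  refine List.filter_congr ?_
  intro p hp
  have hpl : p ∈ l := (PySem.List.mem_dedup l p).mp hp
  have hcont : (dsBest l K).contains p = true := by
    rw [PySem.Dict.contains_iff_mem_keys, dsBest_keys]
    exact hp
  obtain ⟨v, hv⟩ : ∃ v, (dsBest l K).get? p = some v := by
    cases h : (dsBest l K).get? p with
    | none =>
      rw [PySem.Dict.get?_eq_none_iff_contains] at h
      rw [h] at hcont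
      cases hcont
    | some v => exact ⟨v, rfl⟩
  have h0 : PySem.Dict.getD (dsBest l K) p 0 = v := by simp [PySem.Dict.getD, hv]
  have hm1 : PySem.Dict.getD (dsBest l K) p (-1) = v := by simp [PySem.Dict.getD, hv]
  rw [Bool.eq_iff_iff, beq_iff_eq, h0]
  rw [← hm1]
  exact getD_dsBest l K p hpl j

-- ===== VERDICT (by name: the statement is the Claim_ definition above) =====
theorem dilated_schedule_spec : Claim_equal_dilated_schedule := by
  unfold Claim_equal_dilated_schedule
  intro positions base hdom
  unfold Spec_dilated_schedule
  by_cases hpos : positions = []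
  · subst hpos
    simp [dilated_schedule, dilated_schedule_alt]
  · set l := PySem.List.sorted positions (fun p => p) with hldef
    have hperm : l.Perm positions := PySem.List.sorted_perm positions (fun p => p) false
    have hle : l.Pairwise (fun a b => a ≤ b) := PySem.List.sorted_pairwise positions (fun p => p)
    have hlnil : l ≠ [] := fun h => hpos (List.Perm.eq_nil (h ▸ hperm).symm)
    have hn1 : 1 ≤ l.length := List.length_pos_of_ne_nil hlnil
    set K := max 1 (Nat.clog 2 (l.length + 1)) with hKdef
    have hK1 : 1 ≤ K := le_max_left _ _
    have hnK : l.length < 2 ^ K := by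
      have h1 : l.length + 1 ≤ 2 ^ Nat.clog 2 (l.length + 1) := Nat.le_pow_clog (by norm_num) _
      have h2 : (2 : Nat) ^ Nat.clog 2 (l.length + 1) ≤ 2 ^ K :=
        Nat.pow_le_pow_right (by norm_num) (le_max_right _ _)
      omega
    have hinv0 : InvS l K PySem.Set.empty ((K - 1) + 1) := by
      rw [Nat.sub_add_cancel hK1]
      intro q
      constructor
      · intro h
        simp [PySem.Set.empty] at h
      · rintro ⟨i, hi, hge, _⟩
        exact absurd (dsLevel_lt K i hK1) (by omega)
    obtain ⟨hsteps, hfin⟩ := loop_main l hle K hnK (K - 1) (by omega) PySem.Set.empty [] hinv0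
    rw [Nat.sub_add_cancel hK1] at hsteps
    have hA : dilated_schedule positions base =
        (if l.filter (fun p =>
              !((dsLoop l (l.length : Int) (2 ^ (K - 1)) PySem.Set.empty []).2.contains p)) = []
         then (dsLoop l (l.length : Int) (2 ^ (K - 1)) PySem.Set.empty []).1
         else (dsLoop l (l.length : Int) (2 ^ (K - 1)) PySem.Set.empty []).1 ++
           [l.filter (fun p =>
              !((dsLoop l (l.length : Int) (2 ^ (K - 1)) PySem.Set.empty []).2.contains p))]) := by
      unfold dilated_schedule
      rw [if_neg hpos]
    have hrem : l.filter (fun p =>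
        !((dsLoop l (l.length : Int) (2 ^ (K - 1)) PySem.Set.empty []).2.contains p)) = [] := by
      rw [List.filter_eq_nil_iff]
      intro p hp
      obtain ⟨i, hi, hval⟩ := List.mem_iff_getElem.mp hp
      have hpin : p ∈ (dsLoop l (l.length : Int) (2 ^ (K - 1)) PySem.Set.empty []).2 := by
        rw [hfin]
        refine ⟨i, hi, Nat.zero_le _, ?_⟩
        rw [dsVal, PySem.List.pyGetD_natCast, List.getD_eq_getElem _ _ hi]
        exact hval.symm
      have hct : (dsLoop l (l.length : Int) (2 ^ (K - 1)) PySem.Set.empty []).2.contains p = true :=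
        (PySem.Set.contains_iff _ _).mpr hpin
      simp
      exact hpin
    have hB : dilated_schedule_alt positions base =
        ((List.range K).reverse).foldl
          (fun out (j : Nat) =>
            if (dsBest l K).keys.filter
                (fun p => PySem.Dict.getD (dsBest l K) p 0 == (j : Int)) = []
            then out
            else out ++ [(dsBest l K).keys.filter
                (fun p => PySem.Dict.getD (dsBest l K) p 0 == (j : Int))]) [] := by
      unfold dilated_schedule_alt
      rw [if_neg hpos]
    rw [hA, if_pos hrem, hsteps, hB]
    rw [PySem.List.foldl_congr_mem ((List.range K).reverse)
      (fun out (j : Nat) =>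
        if (dsBest l K).keys.filter
            (fun p => PySem.Dict.getD (dsBest l K) p 0 == (j : Int)) = []
        then out
        else out ++ [(dsBest l K).keys.filter
            (fun p => PySem.Dict.getD (dsBest l K) p 0 == (j : Int))])
      (fun out j => if (!decide (bucketD l K j = [])) = true then out ++ [bucketD l K j] else out)
      [] (fun acc j _ => by
        simp only [bucketPort_eq]
        by_cases hb : bucketD l K j = [] <;> simp [hb])]
    rw [PySem.List.foldl_append_if (fun j => !decide (bucketD l K j = [])) (bucketD l K)
      ((List.range K).reverse) []]
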